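-- pv_equiv track=rewrite | github.com/abhi798949/NCM-with-TIG | cohere_parser.py | fallback_command_mapping
-- ===== SOURCE A (Python) =====
-- def fallback_command_mapping(prompt, device_key, examples):
--     """
--     Fallback function that maps common phrases to commands without AI
--     """
--     prompt_lower = prompt.lower()
--
--     # Common show command mappings
--     if any(phrase in prompt_lower for phrase in ["ports are up", "interface status", "interfaces up", "which ports"]):
--         return "show interfaces" if device_key == "cisco_xr" else "show ip interface brief"
--     elif any(phrase in prompt_lower for phrase in ["running config", "configuration", "config"]):
--         return "show running-config"
--     elif "version" in prompt_lower:
--         return "show version"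
--     elif any(phrase in prompt_lower for phrase in ["routes", "routing table", "route table"]):
--         return "show route" if device_key == "cisco_xr" else "show ip route"
--     elif "arp" in prompt_lower:
--         return "show arp"
--     elif any(phrase in prompt_lower for phrase in ["mac", "mac table", "mac address"]):
--         if device_key == "cisco_xr":
--             return "show l2vpn forwarding"
--         elif device_key == "juniper_junos":
--             return "show ethernet-switching table"
--         else:
--             return "show mac address-table"
--     else:
--         # Default to interface status for port-related queries
--         return "show interfaces" if device_key == "cisco_xr" else "show ip interface brief"
-- ===== SOURCE B (Python) =====
-- # Different algorithm: instead of an ordered early-return chain of group checks,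
-- # scan one flat phrase->category table in full, take the MINIMUM matched category
-- # (priority), and resolve the command by a single (category, device)-keyed lookup.
-- # Redundant phrases of A ("running config", "configuration", "mac table",
-- # "mac address") are dropped: each contains a shorter phrase of the same category
-- # ("config" / "mac"), so matching is unchanged.
--
-- PHRASES = [
--     ("ports are up", 0), ("interface status", 0), ("interfaces up", 0), ("which ports", 0),
--     ("config", 1),
--     ("version", 2),
--     ("routes", 3), ("routing table", 3), ("route table", 3),
--     ("arp", 4),
--     ("mac", 5),
-- ]
--
-- GENERIC = ["show ip interface brief", "show running-config", "show version",
--            "show ip route", "show arp", "show mac address-table"]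
--
-- OVERRIDES = {
--     (0, "cisco_xr"): "show interfaces",
--     (3, "cisco_xr"): "show route",
--     (5, "cisco_xr"): "show l2vpn forwarding",
--     (5, "juniper_junos"): "show ethernet-switching table",
-- }
--
--
-- def fallback_command_mapping(prompt, device_key, examples):
--     p = prompt.lower()
--     matched = {cat for phrase, cat in PHRASES if phrase in p}
--     cat = min(matched, default=0)  # category 0 doubles as the no-match default
--     return OVERRIDES.get((cat, device_key), GENERIC[cat])
-- ===== Notes on version B (the rewrite author's own statement) =====
-- stated objective: alternative
-- what changed: Replaced the ordered early-return if/elif chain of group checks by a priority computation: one flat phrase-to-category table (with redundant phrases that contain a shorter same-category phrase dropped) is scanned in full, the minimum matched category is taken, and the command is resolved by a single (category, device_key)-keyed dict lookup with a generic-command list as fallback.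
import Mathlib
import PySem

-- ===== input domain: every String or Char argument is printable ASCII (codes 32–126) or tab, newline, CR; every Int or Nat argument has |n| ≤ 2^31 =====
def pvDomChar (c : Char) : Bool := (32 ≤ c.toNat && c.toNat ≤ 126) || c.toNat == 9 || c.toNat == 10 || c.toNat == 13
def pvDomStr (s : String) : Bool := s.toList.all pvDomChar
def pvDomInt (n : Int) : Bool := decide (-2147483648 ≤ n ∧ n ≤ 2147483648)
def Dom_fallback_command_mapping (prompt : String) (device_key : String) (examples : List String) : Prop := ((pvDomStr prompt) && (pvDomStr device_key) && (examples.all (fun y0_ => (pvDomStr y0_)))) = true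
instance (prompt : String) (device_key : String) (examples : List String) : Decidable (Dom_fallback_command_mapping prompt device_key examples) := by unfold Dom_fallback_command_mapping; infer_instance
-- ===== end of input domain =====

-- B replaces A's ordered if/elif chain by a flat phrase->category table: minimum matched category, then one (category, device)-keyed lookup; alternative decomposition, same cost.


-- ===== PORT A =====
def fallback_command_mapping (prompt : String) (device_key : String) (examples : List String) : String :=
  if ["ports are up", "interface status", "interfaces up", "which ports"].any
      (fun phrase => PySem.Str.isIn phrase (PySem.Str.lower prompt)) then
    if device_key == "cisco_xr" then "show interfaces" else "show ip interface brief"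
  else if ["running config", "configuration", "config"].any
      (fun phrase => PySem.Str.isIn phrase (PySem.Str.lower prompt)) then
    "show running-config"
  else if PySem.Str.isIn "version" (PySem.Str.lower prompt) then
    "show version"
  else if ["routes", "routing table", "route table"].any
      (fun phrase => PySem.Str.isIn phrase (PySem.Str.lower prompt)) then
    if device_key == "cisco_xr" then "show route" else "show ip route"
  else if PySem.Str.isIn "arp" (PySem.Str.lower prompt) then
    "show arp"
  else if ["mac", "mac table", "mac address"].any
      (fun phrase => PySem.Str.isIn phrase (PySem.Str.lower prompt)) then
    if device_key == "cisco_xr" then "show l2vpn forwarding"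
    else if device_key == "juniper_junos" then "show ethernet-switching table"
    else "show mac address-table"
  else
    if device_key == "cisco_xr" then "show interfaces" else "show ip interface brief"

-- ===== PORT B =====
-- Source B's module-level tables
def pvPhrases : List (String × Int) :=
  [("ports are up", 0), ("interface status", 0), ("interfaces up", 0), ("which ports", 0),
   ("config", 1),
   ("version", 2),
   ("routes", 3), ("routing table", 3), ("route table", 3),
   ("arp", 4),
   ("mac", 5)]

def pvGeneric : List String :=
  ["show ip interface brief", "show running-config", "show version",
   "show ip route", "show arp", "show mac address-table"]

def pvOverrides : PySem.Dict (Int × String) String :=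
  PySem.Dict.ofList
    [((0, "cisco_xr"), "show interfaces"),
     ((3, "cisco_xr"), "show route"),
     ((5, "cisco_xr"), "show l2vpn forwarding"),
     ((5, "juniper_junos"), "show ethernet-switching table")]

-- Source B: matched = {cat for phrase, cat in PHRASES if phrase in p}; cat = min(matched, default=0)
def pvMatchedCat (p : String) : Int :=
  (PySem.List.min?
    (PySem.Set.ofList ((pvPhrases.filter (fun q => PySem.Str.isIn q.1 p)).map Prod.snd))
    (fun x => x)).getD 0

def fallback_command_mapping_alt (prompt : String) (device_key : String) (examples : List String) : String :=
  -- GENERIC[cat]: cat is always 0..5, so the index never raises; the "" default is unreachable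
  pvOverrides.getD (pvMatchedCat (PySem.Str.lower prompt), device_key)
    ((PySem.List.pyGet? pvGeneric (pvMatchedCat (PySem.Str.lower prompt))).getD "")

-- ===== PRECONDITION & SPEC =====
def Spec_fallback_command_mapping (prompt : String) (device_key : String) (examples : List String) (out : String) : Prop := out = fallback_command_mapping_alt prompt device_key examples
instance (prompt : String) (device_key : String) (examples : List String) (out : String) : Decidable (Spec_fallback_command_mapping prompt device_key examples out) := by unfold Spec_fallback_command_mapping; infer_instance

-- ===== CLAIM (what is proved, stated in full; the proofs are below) =====
def Claim_equal_fallback_command_mapping : Prop := ∀ (prompt : String) (device_key : String) (examples : List String), Dom_fallback_command_mapping prompt device_key examples → Spec_fallback_command_mapping prompt device_key examples (fallback_command_mapping prompt device_key examples)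

-- ===== LEMMAS AND PROOFS =====

-- substring containment is transitive: if b occurs in a and a occurs in p then b occurs in p
theorem pvIsIn_trans (a b p : String) (hab : b.toList <:+: a.toList)
    (h : PySem.Str.isIn a p = true) : PySem.Str.isIn b p = true := by
  rw [PySem.Str.isIn_iff_infix] at h ⊢
  exact hab.trans h

-- the minimum matched category is g when some phrase of category g matches and every matching phrase has category ≥ g
theorem pvMatchedCat_eq (p : String) (g : Int)
    (hex : ∃ q ∈ pvPhrases, q.2 = g ∧ PySem.Str.isIn q.1 p = true)
    (hub : ∀ q ∈ pvPhrases, PySem.Str.isIn q.1 p = true → g ≤ q.2) :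
    pvMatchedCat p = g := by
  unfold pvMatchedCat
  have hgL : g ∈ (pvPhrases.filter (fun q => PySem.Str.isIn q.1 p)).map Prod.snd := by
    obtain ⟨q, hq, h2, hc⟩ := hex
    exact h2 ▸ List.mem_map_of_mem (List.mem_filter.mpr ⟨hq, hc⟩)
  have hgS : g ∈ PySem.Set.ofList ((pvPhrases.filter (fun q => PySem.Str.isIn q.1 p)).map Prod.snd) := by
    rw [PySem.Set.mem_ofList]; exact hgL
  cases hm : PySem.List.min?
      (PySem.Set.ofList ((pvPhrases.filter (fun q => PySem.Str.isIn q.1 p)).map Prod.snd))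
      (fun x => x) with
  | none =>
      rw [PySem.List.min?_eq_none_iff] at hm
      rw [hm] at hgS
      cases hgS
  | some m =>
      have hmem := PySem.List.min?_mem hm
      rw [PySem.Set.mem_ofList] at hmem
      obtain ⟨q, hqf, rfl⟩ := List.mem_map.mp hmem
      have hq := List.mem_filter.mp hqf
      have h1 : g ≤ q.2 := hub q hq.1 hq.2
      have h2 : q.2 ≤ g := PySem.List.min?_isMin hm g hgS
      simp [le_antisymm h2 h1]

-- no phrase matches: the set is empty and min's default 0 is used
theorem pvMatchedCat_none (p : String)
    (h : ∀ q ∈ pvPhrases, PySem.Str.isIn q.1 p = false) :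
    pvMatchedCat p = 0 := by
  unfold pvMatchedCat
  have : pvPhrases.filter (fun q => PySem.Str.isIn q.1 p) = [] := by
    rw [List.filter_eq_nil_iff]
    intro q hq
    simpa using h q hq
  rw [this]
  rfl

-- resolution of OVERRIDES.get((g, dk), GENERIC[g]) for each concrete category g
theorem pvResolve0 (dk : String) :
    pvOverrides.getD (0, dk) ((PySem.List.pyGet? pvGeneric 0).getD "") =
      (if dk == "cisco_xr" then "show interfaces" else "show ip interface brief") := by
  by_cases h : dk = "cisco_xr"
  · subst h; decide
  · simp [pvOverrides, PySem.Dict.ofList, PySem.Dict.update, List.foldl, PySem.Dict.getD_insert,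
      PySem.Dict.getD_empty, Prod.mk.injEq, h, pvGeneric, PySem.List.pyGet?, PySem.List.pyIdx?]

theorem pvResolve1 (dk : String) :
    pvOverrides.getD (1, dk) ((PySem.List.pyGet? pvGeneric 1).getD "") = "show running-config" := by
  simp [pvOverrides, PySem.Dict.ofList, PySem.Dict.update, List.foldl, PySem.Dict.getD_insert,
    PySem.Dict.getD_empty, Prod.mk.injEq, pvGeneric, PySem.List.pyGet?, PySem.List.pyIdx?]

theorem pvResolve2 (dk : String) :
    pvOverrides.getD (2, dk) ((PySem.List.pyGet? pvGeneric 2).getD "") = "show version" := by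
  simp [pvOverrides, PySem.Dict.ofList, PySem.Dict.update, List.foldl, PySem.Dict.getD_insert,
    PySem.Dict.getD_empty, Prod.mk.injEq, pvGeneric, PySem.List.pyGet?, PySem.List.pyIdx?]

theorem pvResolve3 (dk : String) :
    pvOverrides.getD (3, dk) ((PySem.List.pyGet? pvGeneric 3).getD "") =
      (if dk == "cisco_xr" then "show route" else "show ip route") := by
  by_cases h : dk = "cisco_xr"
  · subst h; decide
  · simp [pvOverrides, PySem.Dict.ofList, PySem.Dict.update, List.foldl, PySem.Dict.getD_insert,
      PySem.Dict.getD_empty, Prod.mk.injEq, h, pvGeneric, PySem.List.pyGet?, PySem.List.pyIdx?]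

theorem pvResolve4 (dk : String) :
    pvOverrides.getD (4, dk) ((PySem.List.pyGet? pvGeneric 4).getD "") = "show arp" := by
  simp [pvOverrides, PySem.Dict.ofList, PySem.Dict.update, List.foldl, PySem.Dict.getD_insert,
    PySem.Dict.getD_empty, Prod.mk.injEq, pvGeneric, PySem.List.pyGet?, PySem.List.pyIdx?]

theorem pvResolve5 (dk : String) :
    pvOverrides.getD (5, dk) ((PySem.List.pyGet? pvGeneric 5).getD "") =
      (if dk == "cisco_xr" then "show l2vpn forwarding"
       else if dk == "juniper_junos" then "show ethernet-switching table"
       else "show mac address-table") := by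
  by_cases h1 : dk = "cisco_xr"
  · subst h1; decide
  · by_cases h2 : dk = "juniper_junos"
    · subst h2; decide
    · simp [pvOverrides, PySem.Dict.ofList, PySem.Dict.update, List.foldl, PySem.Dict.getD_insert,
        PySem.Dict.getD_empty, Prod.mk.injEq, h1, h2, pvGeneric, PySem.List.pyGet?, PySem.List.pyIdx?]

-- ===== VERDICT (by name: the statement is the Claim_ definition above) =====
theorem fallback_command_mapping_spec : Claim_equal_fallback_command_mapping := by
  intro prompt device_key examples _
  unfold Spec_fallback_command_mapping fallback_command_mapping fallback_command_mapping_alt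
  set p := PySem.Str.lower prompt with hp
  by_cases hc0 : (["ports are up", "interface status", "interfaces up", "which ports"].any
      (fun phrase => PySem.Str.isIn phrase p)) = true
  · have hcat : pvMatchedCat p = 0 := by
      refine pvMatchedCat_eq p 0 ?_ ?_
      · simp only [List.any_cons, List.any_nil, Bool.or_eq_true, Bool.or_false] at hc0
        rcases hc0 with h|h|h|h
        · exact ⟨("ports are up", 0), by decide, rfl, h⟩
        · exact ⟨("interface status", 0), by decide, rfl, h⟩
        · exact ⟨("interfaces up", 0), by decide, rfl, h⟩
        · exact ⟨("which ports", 0), by decide, rfl, h⟩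
      · intro q hq _
        simp only [pvPhrases, List.mem_cons, List.not_mem_nil, or_false] at hq
        rcases hq with rfl|rfl|rfl|rfl|rfl|rfl|rfl|rfl|rfl|rfl|rfl <;> norm_num
    rw [if_pos hc0, hcat, pvResolve0]
  · rw [if_neg hc0]
    simp only [List.any_cons, List.any_nil, Bool.or_eq_true, Bool.or_false, not_or,
      Bool.not_eq_true] at hc0
    obtain ⟨hf01, hf02, hf03, hf04⟩ := hc0
    by_cases hc1 : (["running config", "configuration", "config"].any
        (fun phrase => PySem.Str.isIn phrase p)) = true
    · have hcat : pvMatchedCat p = 1 := by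
        refine pvMatchedCat_eq p 1 ?_ ?_
        · simp only [List.any_cons, List.any_nil, Bool.or_eq_true, Bool.or_false] at hc1
          rcases hc1 with h|h|h
          · exact ⟨("config", 1), by decide, rfl, pvIsIn_trans _ _ _ (by decide) h⟩
          · exact ⟨("config", 1), by decide, rfl, pvIsIn_trans _ _ _ (by decide) h⟩
          · exact ⟨("config", 1), by decide, rfl, h⟩
        · intro q hq hc
          simp only [pvPhrases, List.mem_cons, List.not_mem_nil, or_false] at hq
          rcases hq with rfl|rfl|rfl|rfl|rfl|rfl|rfl|rfl|rfl|rfl|rfl <;> first | omega | simp_all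
      rw [if_pos hc1, hcat, pvResolve1]
    · rw [if_neg hc1]
      simp only [List.any_cons, List.any_nil, Bool.or_eq_true, Bool.or_false, not_or,
        Bool.not_eq_true] at hc1
      obtain ⟨hf11, hf12, hf13⟩ := hc1
      by_cases hc2 : PySem.Str.isIn "version" p = true
      · have hcat : pvMatchedCat p = 2 := by
          refine pvMatchedCat_eq p 2 ⟨("version", 2), by decide, rfl, hc2⟩ ?_
          intro q hq hc
          simp only [pvPhrases, List.mem_cons, List.not_mem_nil, or_false] at hq
          rcases hq with rfl|rfl|rfl|rfl|rfl|rfl|rfl|rfl|rfl|rfl|rfl <;> first | omega | simp_all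
        rw [if_pos hc2, hcat, pvResolve2]
      · rw [if_neg hc2]
        rw [Bool.not_eq_true] at hc2
        by_cases hc3 : (["routes", "routing table", "route table"].any
            (fun phrase => PySem.Str.isIn phrase p)) = true
        · have hcat : pvMatchedCat p = 3 := by
            refine pvMatchedCat_eq p 3 ?_ ?_
            · simp only [List.any_cons, List.any_nil, Bool.or_eq_true, Bool.or_false] at hc3
              rcases hc3 with h|h|h
              · exact ⟨("routes", 3), by decide, rfl, h⟩
              · exact ⟨("routing table", 3), by decide, rfl, h⟩
              · exact ⟨("route table", 3), by decide, rfl, h⟩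
            · intro q hq hc
              simp only [pvPhrases, List.mem_cons, List.not_mem_nil, or_false] at hq
              rcases hq with rfl|rfl|rfl|rfl|rfl|rfl|rfl|rfl|rfl|rfl|rfl <;> first | omega | simp_all
          rw [if_pos hc3, hcat, pvResolve3]
        · rw [if_neg hc3]
          simp only [List.any_cons, List.any_nil, Bool.or_eq_true, Bool.or_false, not_or,
            Bool.not_eq_true] at hc3
          obtain ⟨hf31, hf32, hf33⟩ := hc3
          by_cases hc4 : PySem.Str.isIn "arp" p = true
          · have hcat : pvMatchedCat p = 4 := by
              refine pvMatchedCat_eq p 4 ⟨("arp", 4), by decide, rfl, hc4⟩ ?_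
              intro q hq hc
              simp only [pvPhrases, List.mem_cons, List.not_mem_nil, or_false] at hq
              rcases hq with rfl|rfl|rfl|rfl|rfl|rfl|rfl|rfl|rfl|rfl|rfl <;> first | omega | simp_all
            rw [if_pos hc4, hcat, pvResolve4]
          · rw [if_neg hc4]
            rw [Bool.not_eq_true] at hc4
            by_cases hc5 : (["mac", "mac table", "mac address"].any
                (fun phrase => PySem.Str.isIn phrase p)) = true
            · have hcat : pvMatchedCat p = 5 := by
                refine pvMatchedCat_eq p 5 ?_ ?_
                · simp only [List.any_cons, List.any_nil, Bool.or_eq_true, Bool.or_false] at hc5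
                  rcases hc5 with h|h|h
                  · exact ⟨("mac", 5), by decide, rfl, h⟩
                  · exact ⟨("mac", 5), by decide, rfl, pvIsIn_trans _ _ _ (by decide) h⟩
                  · exact ⟨("mac", 5), by decide, rfl, pvIsIn_trans _ _ _ (by decide) h⟩
                · intro q hq hc
                  simp only [pvPhrases, List.mem_cons, List.not_mem_nil, or_false] at hq
                  rcases hq with rfl|rfl|rfl|rfl|rfl|rfl|rfl|rfl|rfl|rfl|rfl <;> first | omega | simp_all
              rw [if_pos hc5, hcat, pvResolve5]
            · rw [if_neg hc5]
              simp only [List.any_cons, List.any_nil, Bool.or_eq_true, Bool.or_false, not_or,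
                Bool.not_eq_true] at hc5
              obtain ⟨hf51, hf52, hf53⟩ := hc5
              have hcat : pvMatchedCat p = 0 := by
                refine pvMatchedCat_none p ?_
                intro q hq
                simp only [pvPhrases, List.mem_cons, List.not_mem_nil, or_false] at hq
                rcases hq with rfl|rfl|rfl|rfl|rfl|rfl|rfl|rfl|rfl|rfl|rfl <;> simp_all
              rw [hcat, pvResolve0]
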